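-- pv_equiv track=rewrite | github.com/moonbit-community/moonpython | Lib/re.py | _subn_long_breaks
-- ===== SOURCE A (Python) =====
-- def _subn_long_breaks(repl, string, count=0):
--     out = []
--     i = 0
--     n = 0
--     while i < len(string):
--         if string.startswith("\n\n\n", i):
--             j = i + 3
--             while j < len(string) and string[j] == "\n":
--                 j += 1
--             if count == 0 or n < count:
--                 out.append(repl)
--                 n += 1
--             else:
--                 out.append(string[i:j])
--             i = j
--         else:
--             out.append(string[i])
--             i += 1
--     return "".join(out), n
-- ===== SOURCE B (Python) =====
-- def _subn_long_breaks(repl, string, count=0):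
--     # One pass over the characters with a run-length accumulator: count
--     # consecutive newlines; on leaving a run (or at the end) emit either
--     # repl (run >= 3 and quota left) or the run verbatim.
--     out = []
--     n = 0
--     run = 0
--     for c in string:
--         if c == "\n":
--             run += 1
--         else:
--             if run >= 3 and (count == 0 or n < count):
--                 out.append(repl)
--                 n += 1
--             else:
--                 out.append("\n" * run)
--             run = 0
--             out.append(c)
--     if run >= 3 and (count == 0 or n < count):
--         out.append(repl)
--         n += 1
--     else:
--         out.append("\n" * run)
--     return "".join(out), n
-- ===== Notes on version B (the rewrite author's own statement) =====
-- stated objective: faster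
-- what changed: Replaces A's index-based scan with per-position startswith lookahead and an inner run-extension loop by a single character-level pass that maintains a newline run-length accumulator and flushes each run once on exit.
import Mathlib
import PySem

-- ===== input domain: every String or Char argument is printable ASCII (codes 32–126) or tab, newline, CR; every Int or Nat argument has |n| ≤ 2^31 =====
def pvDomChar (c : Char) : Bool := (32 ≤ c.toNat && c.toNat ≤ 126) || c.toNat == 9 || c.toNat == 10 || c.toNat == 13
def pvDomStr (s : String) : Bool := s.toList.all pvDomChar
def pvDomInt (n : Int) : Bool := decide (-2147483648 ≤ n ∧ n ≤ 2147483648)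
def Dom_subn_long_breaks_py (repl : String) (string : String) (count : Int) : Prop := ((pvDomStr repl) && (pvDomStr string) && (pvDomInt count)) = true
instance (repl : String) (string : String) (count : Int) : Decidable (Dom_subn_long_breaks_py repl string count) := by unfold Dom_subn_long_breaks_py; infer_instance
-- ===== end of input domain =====

-- B replaces A's index scan with startswith lookahead and an inner run-extension loop
-- by a single character-level pass with a newline run-length accumulator (objective: alternative).

-- ===== PORT A =====
-- A's while loop over index i, transliterated as recursion over the suffix of the
-- character list: 'startswith("\n\n\n", i)' is the three-newline pattern, the inner
-- 'while string[j] == "\n"' loop is takeWhile/dropWhile on the remainder, and the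
-- 'out' list is built front-to-back by the recursion.
def goA (repl : List Char) (count : Int) : List Char → Int → List Char × Int
  | '\n' :: '\n' :: '\n' :: rest, n =>
    let run := rest.takeWhile (· = '\n')
    let rest' := rest.dropWhile (· = '\n')
    if count = 0 ∨ n < count then
      let (o, n') := goA repl count rest' (n + 1)
      (repl ++ o, n')
    else
      let (o, n') := goA repl count rest' n
      ('\n' :: '\n' :: '\n' :: run ++ o, n')
  | c :: rest, n =>
    let (o, n') := goA repl count rest n
    (c :: o, n')
  | [], n => ([], n)
  termination_by cs => cs.length
  decreasing_by
    · simp; have := List.length_dropWhile_le (fun c => decide (c = '\n')) rest; omega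
    · simp; have := List.length_dropWhile_le (fun c => decide (c = '\n')) rest; omega
    · simp

def subn_long_breaks_py (repl : String) (string : String) (count : Int) : String × Int :=
  let (o, n) := goA repl.toList count string.toList 0
  (String.ofList o, n)

-- ===== PORT B =====
-- Source B's flush of the accumulated newline run (shared by the loop body and the tail).
def flushB (repl : List Char) (count : Int) (run : Nat) (n : Int) : List Char × Int :=
  if 3 ≤ run ∧ (count = 0 ∨ n < count) then (repl, n + 1)
  else (List.replicate run '\n', n)

-- Source B's for-loop over the characters with state (run, n), building 'out' front-to-back.
def goB (repl : List Char) (count : Int) : List Char → Nat → Int → List Char × Int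
  | [], run, n => flushB repl count run n
  | c :: rest, run, n =>
    if c = '\n' then goB repl count rest (run + 1) n
    else
      let (f, n') := flushB repl count run n
      let (o, n'') := goB repl count rest 0 n'
      (f ++ c :: o, n'')

def subn_long_breaks_py_alt (repl : String) (string : String) (count : Int) : String × Int :=
  let (o, n) := goB repl.toList count string.toList 0 0
  (String.ofList o, n)

-- ===== PRECONDITION & SPEC =====
def Spec_subn_long_breaks_py (repl : String) (string : String) (count : Int) (out : String × Int) : Prop := out = subn_long_breaks_py_alt repl string count
instance (repl : String) (string : String) (count : Int) (out : String × Int) : Decidable (Spec_subn_long_breaks_py repl string count out) := by unfold Spec_subn_long_breaks_py; infer_instance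

-- ===== CLAIM (what is proved, stated in full; the proofs are below) =====
def Claim_equal_subn_long_breaks_py : Prop := ∀ (repl : String) (string : String) (count : Int), Dom_subn_long_breaks_py repl string count → Spec_subn_long_breaks_py repl string count (subn_long_breaks_py repl string count)

-- ===== LEMMAS AND PROOFS =====

-- unfolding goA one step when the head is not a newline
theorem goA_cons_ne (repl : List Char) (count : Int) (c : Char) (hc : ¬ c = '\n')
    (rest : List Char) (n : Int) :
    goA repl count (c :: rest) n
      = (c :: (goA repl count rest n).1, (goA repl count rest n).2) := by
  rw [goA.eq_def]
  rcases rest with _ | ⟨c2, _ | ⟨c3, r⟩⟩ <;> simp [hc]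

-- unfolding goA on a lone newline followed by a non-newline
theorem goA_nl_ne (repl : List Char) (count : Int) (c2 : Char) (hc2 : ¬ c2 = '\n')
    (rest : List Char) (n : Int) :
    goA repl count ('\n' :: c2 :: rest) n
      = ('\n' :: (goA repl count (c2 :: rest) n).1, (goA repl count (c2 :: rest) n).2) := by
  rw [goA.eq_def]
  rcases rest with _ | ⟨c3, r⟩ <;> simp [hc2]

-- consuming a block of newlines just raises goB's run accumulator
theorem goB_newlines (repl : List Char) (count : Int) (ks : List Char)
    (h : ∀ c ∈ ks, c = '\n') (rest : List Char) (r : Nat) (n : Int) :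
    goB repl count (ks ++ rest) r n = goB repl count rest (r + ks.length) n := by
  induction ks generalizing r with
  | nil => simp
  | cons k ks ih =>
    have hk : k = '\n' := h k (by simp)
    simp [goB, hk, ih (fun c hc => h c (by simp [hc]))]
    ring_nf

theorem goB_not_newline (repl : List Char) (count : Int) (c : Char) (hc : ¬ c = '\n')
    (rest : List Char) (r : Nat) (n : Int) :
    goB repl count (c :: rest) r n =
      ((flushB repl count r n).1 ++ c :: (goB repl count rest 0 (flushB repl count r n).2).1,
       (goB repl count rest 0 (flushB repl count r n).2).2) := by
  simp [goB, hc]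

theorem head_dropWhile_ne {α : Type} (p : α → Bool) (l : List α) (c : α) (t : List α)
    (h : l.dropWhile p = c :: t) : p c = false := by
  induction l with
  | nil => simp [List.dropWhile] at h
  | cons a l ih =>
    by_cases hp : p a
    · exact ih (by simpa [List.dropWhile, hp] using h)
    · simp [List.dropWhile, hp] at h
      simpa [h.1] using hp

theorem mem_takeWhile_nl (rest : List Char) :
    ∀ c ∈ rest.takeWhile (· = '\n'), c = '\n' := by
  intro c hc
  have := List.mem_takeWhile_imp hc
  simpa using this

theorem replicate_three_add (t : List Char) (h : ∀ c ∈ t, c = '\n') :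
    List.replicate (3 + t.length) '\n' = '\n' :: '\n' :: '\n' :: t := by
  rw [List.replicate_add]
  have : t = List.replicate t.length '\n' := List.eq_replicate_of_mem h
  rw [← this]
  rfl

theorem goA_eq_goB (repl : List Char) (count : Int) :
    ∀ m (cs : List Char), cs.length ≤ m → ∀ n, goA repl count cs n = goB repl count cs 0 n := by
  intro m
  induction m with
  | zero =>
    intro cs h n
    have : cs = [] := List.eq_nil_of_length_eq_zero (by omega)
    subst this
    simp [goA, goB, flushB]
  | succ m ih =>
    intro cs hlen n
    match cs with
    | [] => simp [goA, goB, flushB]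
    | c :: cs' =>
      by_cases hc : c = '\n'
      · subst hc
        match cs' with
        | [] =>
          simp [goA, goB, flushB]
        | c2 :: cs'' =>
          by_cases hc2 : c2 = '\n'
          · subst hc2
            match cs'' with
            | [] =>
              simp [goA, goB, flushB]
            | c3 :: rest =>
              by_cases hc3 : c3 = '\n'
              · -- a real long break: three newlines plus the extension run
                subst hc3
                have hmem : ∀ x ∈ '\n' :: '\n' :: '\n' :: rest.takeWhile (· = '\n'), x = '\n' := by
                  intro x hx
                  rcases List.mem_cons.mp hx with rfl | hx
                  · rfl
                  rcases List.mem_cons.mp hx with rfl | hx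
                  · rfl
                  rcases List.mem_cons.mp hx with rfl | hx
                  · rfl
                  exact mem_takeWhile_nl rest x hx
                have hsplit : '\n' :: '\n' :: '\n' :: rest
                    = ('\n' :: '\n' :: '\n' :: rest.takeWhile (· = '\n'))
                        ++ rest.dropWhile (· = '\n') := by
                  simp [List.takeWhile_append_dropWhile]
                have hB : goB repl count ('\n' :: '\n' :: '\n' :: rest) 0 n
                    = goB repl count (rest.dropWhile (· = '\n'))
                        (3 + (rest.takeWhile (· = '\n')).length) n := by
                  conv_lhs => rw [hsplit]
                  rw [goB_newlines repl count _ hmem]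
                  congr 1
                  simp
                  omega
                have hA : goA repl count ('\n' :: '\n' :: '\n' :: rest) n =
                    if count = 0 ∨ n < count then
                      let (o, n') := goA repl count (rest.dropWhile (· = '\n')) (n + 1)
                      (repl ++ o, n')
                    else
                      let (o, n') := goA repl count (rest.dropWhile (· = '\n')) n
                      ('\n' :: '\n' :: '\n' :: rest.takeWhile (· = '\n') ++ o, n') := by
                  rw [goA]
                have hflush : flushB repl count (3 + (rest.takeWhile (· = '\n')).length) n =
                    if count = 0 ∨ n < count then (repl, n + 1)
                    else ('\n' :: '\n' :: '\n' :: rest.takeWhile (· = '\n'), n) := by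
                  unfold flushB
                  by_cases hcnt : count = 0 ∨ n < count
                  · simp [hcnt]
                  · simp [hcnt]
                    exact replicate_three_add _ (mem_takeWhile_nl rest)
                rw [hA, hB]
                match hdd : rest.dropWhile (· = '\n') with
                | [] =>
                  rw [goB]
                  rw [hflush]
                  by_cases hcnt : count = 0 ∨ n < count
                  · simp [hcnt, goA]
                  · simp [hcnt, goA]
                | e :: d2 =>
                  have he : ¬ e = '\n' := by
                    have := head_dropWhile_ne (fun x => decide (x = '\n')) rest e d2 (by simpa using hdd)
                    simpa using this
                  have hd2len : d2.length ≤ m := by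
                    have h1 : (rest.dropWhile (· = '\n')).length ≤ rest.length :=
                      List.length_dropWhile_le _ _
                    have h2 := congrArg List.length hdd
                    simp at h2 hlen
                    omega
                  rw [goB_not_newline repl count e he d2 _ n, hflush]
                  by_cases hcnt : count = 0 ∨ n < count
                  · simp only [hcnt, if_pos]
                    rw [goA_cons_ne repl count e he d2 (n + 1), ih d2 hd2len (n + 1)]
                  · simp only [hcnt, if_neg, not_false_iff]
                    rw [goA_cons_ne repl count e he d2 n, ih d2 hd2len n]
              · -- "\n\n" then a non-newline character
                have h1 : goA repl count ('\n' :: '\n' :: c3 :: rest) n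
                    = ('\n' :: (goA repl count ('\n' :: c3 :: rest) n).1,
                       (goA repl count ('\n' :: c3 :: rest) n).2) := by
                  rw [goA.eq_def]; simp [hc3]
                rw [h1, goA_nl_ne repl count c3 hc3 rest n,
                    goA_cons_ne repl count c3 hc3 rest n]
                have hrest : rest.length ≤ m := by simp at hlen; omega
                rw [ih rest hrest n]
                simp [goB, hc3, flushB, List.replicate]
          · -- a lone newline then a non-newline character
            rw [goA_nl_ne repl count c2 hc2 cs'' n, goA_cons_ne repl count c2 hc2 cs'' n]
            have hcs'' : cs''.length ≤ m := by simp at hlen; omega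
            rw [ih cs'' hcs'' n]
            simp [goB, hc2, flushB, List.replicate]
      · -- non-newline head
        rw [goA_cons_ne repl count c hc cs' n]
        have hcs' : cs'.length ≤ m := by simp at hlen; omega
        rw [ih cs' hcs' n]
        simp [goB, hc, flushB]

-- ===== VERDICT (by name: the statement is the Claim_ definition above) =====
theorem subn_long_breaks_py_spec : Claim_equal_subn_long_breaks_py := by
  intro repl string count _
  unfold Spec_subn_long_breaks_py subn_long_breaks_py subn_long_breaks_py_alt
  rw [goA_eq_goB repl.toList count string.toList.length string.toList le_rfl 0]
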